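-- pv_equiv track=rewrite | github.com/Tarun-msrit/PY-codes | challenges.py | spygames
-- ===== SOURCE A (Python) =====
-- def spygames(nums):
--     for i in range(len(nums)):
--
--         if nums[i] == 0:
--
--             for y in range(i + 1, len(nums)):
--
--                 if nums[y] == 0:
--
--                     for z in range(y + 1, len(nums)):
--
--                         if nums[z] == 7:
--                             return True
--
--     else:
--
--         return False
-- ===== SOURCE B (Python) =====
-- def spygames(nums):
--     zeros = 0
--     for n in nums:
--         if zeros >= 2 and n == 7:
--             return True
--         if n == 0:
--             zeros += 1
--     return False
-- ===== Notes on version B (the rewrite author's own statement) =====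
-- stated objective: simpler
-- what changed: replaced the three nested index loops (find 0, then a later 0, then a later 7) by a single left-to-right pass that counts zeros seen so far and answers at the first 7 preceded by two zeros
import Mathlib
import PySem

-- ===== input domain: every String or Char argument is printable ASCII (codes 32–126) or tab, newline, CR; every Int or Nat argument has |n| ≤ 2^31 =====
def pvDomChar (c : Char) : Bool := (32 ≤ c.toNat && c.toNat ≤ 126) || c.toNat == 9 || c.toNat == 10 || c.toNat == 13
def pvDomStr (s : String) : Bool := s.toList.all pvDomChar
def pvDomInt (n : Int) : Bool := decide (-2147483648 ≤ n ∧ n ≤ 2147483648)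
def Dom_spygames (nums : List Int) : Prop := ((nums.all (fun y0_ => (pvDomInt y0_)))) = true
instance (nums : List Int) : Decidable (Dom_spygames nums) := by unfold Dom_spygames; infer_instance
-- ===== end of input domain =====

-- B replaces A's three nested index loops by one pass counting zeros seen; objective: simpler.

-- ===== PORT A =====
-- innermost loop: for z in range(y+1, len(nums)): if nums[z] == 7: return True
def spygames_loopZ (nums : List Int) : List Int → Bool
  | [] => false
  | z :: rest =>
    if PySem.List.pyGetD nums z 0 == 7 then true
    else spygames_loopZ nums rest

-- middle loop: for y in range(i+1, len(nums)): if nums[y] == 0: <z-loop>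
def spygames_loopY (nums : List Int) : List Int → Bool
  | [] => false
  | y :: rest =>
    if PySem.List.pyGetD nums y 0 == 0 then
      if spygames_loopZ nums (PySem.List.pyRange (y + 1) nums.length 1) then true
      else spygames_loopY nums rest
    else spygames_loopY nums rest

-- outer loop: for i in range(len(nums)): if nums[i] == 0: <y-loop>; else branch of the for returns False
def spygames_loopI (nums : List Int) : List Int → Bool
  | [] => false
  | i :: rest =>
    if PySem.List.pyGetD nums i 0 == 0 then
      if spygames_loopY nums (PySem.List.pyRange (i + 1) nums.length 1) then true
      else spygames_loopI nums rest
    else spygames_loopI nums rest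

def spygames (nums : List Int) : Bool :=
  spygames_loopI nums (PySem.List.pyRange 0 nums.length 1)

-- ===== PORT B =====
def spygames_altLoop : List Int → Int → Bool
  | [], _ => false
  | n :: rest, zeros =>
    if 2 ≤ zeros && n == 7 then true
    else spygames_altLoop rest (if n == 0 then zeros + 1 else zeros)

def spygames_alt (nums : List Int) : Bool :=
  spygames_altLoop nums 0

-- ===== PRECONDITION & SPEC =====
def Spec_spygames (nums : List Int) (out : Bool) : Prop := out = spygames_alt nums
instance (nums : List Int) (out : Bool) : Decidable (Spec_spygames nums out) := by unfold Spec_spygames; infer_instance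

-- ===== CLAIM (what is proved, stated in full; the proofs are below) =====
def Claim_equal_spygames : Prop := ∀ (nums : List Int), Dom_spygames nums → Spec_spygames nums (spygames nums)

-- ===== LEMMAS AND PROOFS =====

-- structural characterisations of A's loops (proof-only helpers)
def pvAny7 (l : List Int) : Bool := l.any (· == 7)

def pvG : List Int → Bool
  | [] => false
  | n :: rest => if n == 0 then (if pvAny7 rest then true else pvG rest) else pvG rest

def pvF : List Int → Bool
  | [] => false
  | n :: rest => if n == 0 then (if pvG rest then true else pvF rest) else pvF rest

lemma loopZ_range (nums : List Int) : ∀ (d j : Nat), nums.length ≤ j + d →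
    spygames_loopZ nums (PySem.List.pyRange j nums.length 1) = pvAny7 (nums.drop j) := by
  intro d
  induction d with
  | zero =>
    intro j hj
    rw [PySem.List.pyRange_one_eq_nil (by exact_mod_cast by omega)]
    rw [List.drop_eq_nil_of_le (by omega)]
    rfl
  | succ d ih =>
    intro j hj
    by_cases h : j < nums.length
    · rw [PySem.List.pyRange_one_cons (by exact_mod_cast h)]
      have hd : nums.drop j = nums[j] :: nums.drop (j + 1) := List.drop_eq_getElem_cons h
      rw [spygames_loopZ, hd, pvAny7, List.any_cons]
      have hg : PySem.List.pyGetD nums (j : Int) 0 = nums[j] := by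
        rw [PySem.List.pyGetD_natCast]; exact List.getD_eq_getElem _ _ h
      rw [hg]
      have hcast : (j : Int) + 1 = ((j + 1 : Nat) : Int) := by push_cast; ring
      rw [hcast, ih (j + 1) (by omega)]
      by_cases h7 : nums[j] == 7
      · simp [h7]
      · simp [h7, pvAny7]
    · rw [PySem.List.pyRange_one_eq_nil (by exact_mod_cast by omega)]
      rw [List.drop_eq_nil_of_le (by omega)]
      rfl

lemma loopY_range (nums : List Int) : ∀ (d j : Nat), nums.length ≤ j + d →
    spygames_loopY nums (PySem.List.pyRange j nums.length 1) = pvG (nums.drop j) := by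
  intro d
  induction d with
  | zero =>
    intro j hj
    rw [PySem.List.pyRange_one_eq_nil (by exact_mod_cast by omega)]
    rw [List.drop_eq_nil_of_le (by omega)]
    rfl
  | succ d ih =>
    intro j hj
    by_cases h : j < nums.length
    · rw [PySem.List.pyRange_one_cons (by exact_mod_cast h)]
      have hd : nums.drop j = nums[j] :: nums.drop (j + 1) := List.drop_eq_getElem_cons h
      rw [spygames_loopY, hd, pvG]
      have hg : PySem.List.pyGetD nums (j : Int) 0 = nums[j] := by
        rw [PySem.List.pyGetD_natCast]; exact List.getD_eq_getElem _ _ h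
      rw [hg]
      have hcast : (j : Int) + 1 = ((j + 1 : Nat) : Int) := by push_cast; ring
      rw [hcast, loopZ_range nums (nums.length) (j+1) (by omega), ih (j + 1) (by omega)]
    · rw [PySem.List.pyRange_one_eq_nil (by exact_mod_cast by omega)]
      rw [List.drop_eq_nil_of_le (by omega)]
      rfl

lemma loopI_range (nums : List Int) : ∀ (d j : Nat), nums.length ≤ j + d →
    spygames_loopI nums (PySem.List.pyRange j nums.length 1) = pvF (nums.drop j) := by
  intro d
  induction d with
  | zero =>
    intro j hj
    rw [PySem.List.pyRange_one_eq_nil (by exact_mod_cast by omega)]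
    rw [List.drop_eq_nil_of_le (by omega)]
    rfl
  | succ d ih =>
    intro j hj
    by_cases h : j < nums.length
    · rw [PySem.List.pyRange_one_cons (by exact_mod_cast h)]
      have hd : nums.drop j = nums[j] :: nums.drop (j + 1) := List.drop_eq_getElem_cons h
      rw [spygames_loopI, hd, pvF]
      have hg : PySem.List.pyGetD nums (j : Int) 0 = nums[j] := by
        rw [PySem.List.pyGetD_natCast]; exact List.getD_eq_getElem _ _ h
      rw [hg]
      have hcast : (j : Int) + 1 = ((j + 1 : Nat) : Int) := by push_cast; ring
      rw [hcast, loopY_range nums (nums.length) (j+1) (by omega), ih (j + 1) (by omega)]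
    · rw [PySem.List.pyRange_one_eq_nil (by exact_mod_cast by omega)]
      rw [List.drop_eq_nil_of_le (by omega)]
      rfl

lemma spygames_eq_pvF (nums : List Int) : spygames nums = pvF nums := by
  have h0 : (0 : Int) = ((0 : Nat) : Int) := by norm_num
  rw [spygames, h0, loopI_range nums nums.length 0 (by omega), List.drop_zero]

-- now relate B's single pass to pvF
lemma pvG_imp_any7 : ∀ l : List Int, pvG l = true → pvAny7 l = true := by
  intro l
  induction l with
  | nil => simp [pvG]
  | cons n rest ih =>
    intro h
    rw [pvG] at h
    rw [pvAny7, List.any_cons]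
    by_cases h0 : n == 0
    · simp only [h0, if_true] at h
      by_cases h7 : pvAny7 rest
      · simp [pvAny7] at h7 ⊢; right; exact h7
      · simp only [h7, if_false, Bool.false_eq_true] at h
        have := ih h
        simp [pvAny7] at this ⊢; right; exact this
    · simp only [h0, if_false, Bool.false_eq_true] at h
      have := ih h
      simp [pvAny7] at this ⊢; right; exact this

lemma pvF_imp_pvG : ∀ l : List Int, pvF l = true → pvG l = true := by
  intro l
  induction l with
  | nil => simp [pvF]
  | cons n rest ih =>
    intro h
    rw [pvF] at h
    rw [pvG]
    by_cases h0 : n == 0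
    · simp only [h0, if_true] at h ⊢
      by_cases hg : pvG rest
      · rw [pvG_imp_any7 rest hg]; simp
      · simp only [hg, if_false, Bool.false_eq_true] at h
        exact absurd (ih h) (by simp [hg])
    · simp only [h0] at h ⊢
      simpa using ih (by simpa using h)

lemma altLoop_ge2 : ∀ (l : List Int) (z : Int), 2 ≤ z → spygames_altLoop l z = pvAny7 l := by
  intro l
  induction l with
  | nil => intro z _; rfl
  | cons n rest ih =>
    intro z hz
    rw [spygames_altLoop, pvAny7, List.any_cons]
    by_cases h7 : n == 7
    · simp [h7, hz]
    · have hc : (2 ≤ z && n == 7) = false := by simp [h7]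
      rw [hc, if_neg (by simp)]
      by_cases h0 : n == 0
      · rw [if_pos h0, ih (z + 1) (by omega)]
        simp [h7, pvAny7]
      · rw [if_neg (by simp [h0]), ih z hz]
        simp [h7, pvAny7]

lemma altLoop_one : ∀ l : List Int, spygames_altLoop l 1 = pvG l := by
  intro l
  induction l with
  | nil => rfl
  | cons n rest ih =>
    rw [spygames_altLoop, pvG]
    have hc : ((2:Int) ≤ 1 && n == 7) = false := by simp
    rw [hc, if_neg (by simp)]
    by_cases h0 : n == 0
    · rw [if_pos h0, if_pos h0, altLoop_ge2 rest (1+1) (by omega)]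
      by_cases h7 : pvAny7 rest
      · simp [h7]
      · simp only [h7]
        cases hg : pvG rest with
        | false => simp [pvAny7] at h7; simp [h7]
        | true => exact absurd (pvG_imp_any7 rest hg) (by simp [h7])
    · rw [if_neg (by simp [h0]), if_neg (by simpa using h0), ih]

lemma altLoop_zero : ∀ l : List Int, spygames_altLoop l 0 = pvF l := by
  intro l
  induction l with
  | nil => rfl
  | cons n rest ih =>
    rw [spygames_altLoop, pvF]
    have hc : ((2:Int) ≤ 0 && n == 7) = false := by simp
    rw [hc, if_neg (by simp)]
    by_cases h0 : n == 0
    · rw [if_pos h0, if_pos h0, show (0:Int)+1 = 1 from rfl, altLoop_one rest]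
      by_cases hg : pvG rest
      · simp [hg]
      · simp only [hg]
        cases hf : pvF rest with
        | false => simp at hg; simp
        | true => exact absurd (pvF_imp_pvG rest hf) (by simp [hg])
    · rw [if_neg (by simp [h0]), if_neg (by simpa using h0), ih]

-- ===== VERDICT (by name: the statement is the Claim_ definition above) =====
theorem spygames_spec : Claim_equal_spygames := by
  intro nums _
  unfold Spec_spygames spygames_alt
  rw [spygames_eq_pvF, altLoop_zero]
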